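-- pv_equiv track=rewrite | github.com/jinyuo/Algorithm | 프로그래머스/unrated/160586. 대충 만든 자판/대충 만든 자판.py | solution
-- ===== SOURCE A (Python) =====
-- def solution(keymap, targets):
--     answer = []
--     key_map = dict()
--     for key in keymap:
--         for i in range(len(key)):
--             if key[i] not in key_map.keys():
--                 key_map[key[i]] = i
--             else:
--                 if i < key_map[key[i]]:
--                     key_map[key[i]] = i
--
--     for target in targets:
--         try:
--             answer.append(sum([key_map[t] + 1 for t in target]))
--         except KeyError:
--             answer.append(-1)
--
--     return answer
-- ===== SOURCE B (Python) =====
-- def solution(keymap, targets):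
--     res = []
--     for target in targets:
--         total = 0
--         for c in target:
--             best = -1
--             for key in keymap:
--                 if c in key:
--                     p = key.index(c)
--                     if best == -1 or p < best:
--                         best = p
--             if best == -1:
--                 total = -1
--                 break
--             total += best + 1
--         res.append(total)
--     return res
-- ===== Notes on version B (the rewrite author's own statement) =====
-- stated objective: simpler
-- what changed: B drops A's prebuilt min-index dictionary and try/except: for each target character it scans the keymap directly for the minimal first-occurrence position, breaking to -1 when a character appears in no key.
import Mathlib
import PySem

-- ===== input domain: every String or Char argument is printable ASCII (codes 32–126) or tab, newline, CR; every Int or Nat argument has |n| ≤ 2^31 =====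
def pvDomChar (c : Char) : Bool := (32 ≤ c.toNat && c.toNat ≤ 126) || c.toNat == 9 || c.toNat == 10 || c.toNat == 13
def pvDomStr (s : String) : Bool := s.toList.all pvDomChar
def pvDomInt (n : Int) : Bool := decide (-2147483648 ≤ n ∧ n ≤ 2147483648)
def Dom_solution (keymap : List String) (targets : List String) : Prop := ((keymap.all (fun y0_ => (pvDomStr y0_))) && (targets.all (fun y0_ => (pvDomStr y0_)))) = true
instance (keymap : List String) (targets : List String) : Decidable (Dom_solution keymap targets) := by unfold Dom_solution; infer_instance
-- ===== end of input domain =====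

-- B drops A's prebuilt min-index dictionary and try/except: each target character is
-- resolved by a direct scan over the keymap for the minimal first-occurrence position
-- (objective: simpler, no speed claim).

-- ===== PORT A =====
-- one step of A's inner loop 'for i in range(len(key)): ...' (state = (key_map, i))
def pvAUpd (st : PySem.Dict Char Int × Nat) (ch : Char) : PySem.Dict Char Int × Nat :=
  match st.1.get? ch with
  | none => (st.1.insert ch (st.2 : Int), st.2 + 1)
  | some v => if (st.2 : Int) < v then (st.1.insert ch (st.2 : Int), st.2 + 1) else (st.1, st.2 + 1)

-- A's first loop: build key_map
def pvBuild (keymap : List String) : PySem.Dict Char Int :=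
  keymap.foldl (fun m key => (key.toList.foldl pvAUpd (m, 0)).1) PySem.Dict.empty

-- sum([key_map[t] + 1 for t in target]): none = the KeyError A catches
def pvSumT (km : PySem.Dict Char Int) : List Char → Option Int
  | [] => some 0
  | c :: cs =>
    match km.get? c with
    | none => none
    | some v => (pvSumT km cs).map (fun s => (v + 1) + s)

def solution (keymap : List String) (targets : List String) : List Int :=
  let key_map := pvBuild keymap
  targets.map (fun target =>
    match pvSumT key_map target.toList with
    | some s => s
    | none => -1)

-- ===== PORT B =====
-- minimal first-occurrence position of c over all keys, -1 when c is in no key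
def pvBest (keymap : List String) (c : Char) : Int :=
  keymap.foldl (fun best key =>
    if c ∈ key.toList then
      let p : Int := (key.toList.idxOf c : Int)
      if best = -1 ∨ p < best then p else best
    else best) (-1)

-- B's inner loop over the target's characters, with the running total; break → -1
def pvTgt (keymap : List String) (total : Int) : List Char → Int
  | [] => total
  | c :: cs =>
    let b := pvBest keymap c
    if b = -1 then -1 else pvTgt keymap (total + b + 1) cs

def solution_alt (keymap : List String) (targets : List String) : List Int :=
  targets.map (fun target => pvTgt keymap 0 target.toList)

-- ===== PRECONDITION & SPEC =====
def Spec_solution (keymap : List String) (targets : List String) (out : List Int) : Prop := out = solution_alt keymap targets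
instance (keymap : List String) (targets : List String) (out : List Int) : Decidable (Spec_solution keymap targets out) := by unfold Spec_solution; infer_instance

-- ===== CLAIM (what is proved, stated in full; the proofs are below) =====
def Claim_equal_solution : Prop := ∀ (keymap : List String) (targets : List String), Dom_solution keymap targets → Spec_solution keymap targets (solution keymap targets)

-- ===== LEMMAS AND PROOFS =====

-- min-combine on optional positions
def pvComb (o p : Option Int) : Option Int :=
  match o, p with
  | none, p => p
  | some v, none => some v
  | some v, some q => some (min q v)

@[simp] theorem pvComb_none (p : Option Int) : pvComb none p = p := by cases p <;> rfl
@[simp] theorem pvComb_some_none (v : Int) : pvComb (some v) none = some v := rfl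
@[simp] theorem pvComb_some_some (v q : Int) : pvComb (some v) (some q) = some (min q v) := rfl
@[simp] theorem pvComb_none_right (o : Option Int) : pvComb o none = o := by cases o <;> rfl

-- first index of c in key, as an optional Int
def pvFirst (key : String) (c : Char) : Option Int :=
  Option.map (fun n : Nat => (n : Int)) (key.toList.idxOf? c)

-- characterization of the fold pvBest/pvBuild both reduce to
def pvMinIdx (keymap : List String) (c : Char) : Option Int :=
  keymap.foldl (fun o key => pvComb o (pvFirst key c)) none

theorem pv_idxOf?_mem {l : List Char} {c : Char} (h : c ∈ l) :
    List.idxOf? c l = some (l.idxOf c) := by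
  induction l with
  | nil => cases h
  | cons d l ih =>
    rw [List.idxOf?_cons, List.idxOf_cons]
    by_cases hd : d = c
    · simp [hd]
    · have hb : (d == c) = false := by simp [hd]
      have hm : c ∈ l := by cases h with
        | head => exact absurd rfl hd
        | tail _ h => exact h
      simp [hb, ih hm]

theorem pvFirst_of_mem {key : String} {c : Char} (h : c ∈ key.toList) :
    pvFirst key c = some ((key.toList.idxOf c : Nat) : Int) := by
  unfold pvFirst; rw [pv_idxOf?_mem h]; rfl

theorem pvFirst_of_not_mem {key : String} {c : Char} (h : c ∉ key.toList) :
    pvFirst key c = none := by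
  unfold pvFirst; rw [List.idxOf?_eq_none_iff.mpr h]; rfl

-- A's inner loop over one key, characterized
theorem pvAUpd_foldl (l : List Char) :
    ∀ (m : PySem.Dict Char Int) (i : Nat) (c : Char),
      ((l.foldl pvAUpd (m, i)).1).get? c
        = pvComb (m.get? c) ((List.idxOf? c l).map (fun j => ((i + j : Nat) : Int))) := by
  induction l with
  | nil => intro m i c; simp
  | cons d l ih =>
    intro m i c
    have hstep : ∃ m', pvAUpd (m, i) d = (m', i + 1)
        ∧ m'.get? c = pvComb (m.get? c) (if d = c then some (i : Int) else none) := by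
      cases hd : m.get? d with
      | none =>
        refine ⟨m.insert d (i : Int), by simp [pvAUpd, hd], ?_⟩
        rw [PySem.Dict.get?_insert]
        by_cases hc : c = d
        · subst hc; simp [hd]
        · simp [hc, Ne.symm hc]
      | some v =>
        by_cases hlt : (i : Int) < v
        · refine ⟨m.insert d (i : Int), by simp [pvAUpd, hd, hlt], ?_⟩
          rw [PySem.Dict.get?_insert]
          by_cases hc : c = d
          · subst hc; simp [hd]; omega
          · simp [hc, Ne.symm hc]
        · refine ⟨m, by simp [pvAUpd, hd, hlt], ?_⟩
          by_cases hc : c = d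
          · subst hc; simp [hd]; omega
          · rw [if_neg (fun h => hc h.symm), pvComb_none_right]
    obtain ⟨m', hfold, hget⟩ := hstep
    show ((List.foldl pvAUpd (pvAUpd (m, i) d) l).1).get? c = _
    rw [hfold, ih m' (i + 1) c, hget, List.idxOf?_cons]
    by_cases hd : d = c
    · subst hd
      rw [if_pos (beq_self_eq_true d), if_pos (rfl : d = d)]
      cases hrest : (List.idxOf? d l) with
      | none =>
        cases h : m.get? d <;> simp
      | some j =>
        cases h : m.get? d with
        | none =>
          simp only [pvComb_none, Option.map_some, pvComb_some_some, Option.some.injEq]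
          push_cast
          omega
        | some v =>
          simp only [pvComb_some_some, Option.map_some, Option.some.injEq]
          push_cast
          omega
    · have hb : (d == c) = false := by simp [hd]
      simp only [hb, Bool.false_eq_true, if_false, if_neg hd, pvComb_none_right,
        Option.map_map]
      cases hrest : (List.idxOf? c l) with
      | none => simp
      | some j =>
        simp only [Option.map_some, Function.comp]
        have : ((i + 1 + j : Nat) : Int) = ((i + (j + 1) : Nat) : Int) := by push_cast; ring
        rw [this]

-- the built dict's lookups
theorem pvBuild_get? (keymap : List String) (c : Char) :
    (pvBuild keymap).get? c = pvMinIdx keymap c := by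
  unfold pvBuild pvMinIdx
  suffices h : ∀ (km : List String) (m : PySem.Dict Char Int),
      (km.foldl (fun m key => (key.toList.foldl pvAUpd (m, 0)).1) m).get? c
        = km.foldl (fun o key => pvComb o (pvFirst key c)) (m.get? c) by
    rw [h keymap PySem.Dict.empty, PySem.Dict.get?_empty]
  intro km
  induction km with
  | nil => intro m; rfl
  | cons key km ih =>
    intro m
    simp only [List.foldl_cons]
    rw [ih ((key.toList.foldl pvAUpd (m, 0)).1)]
    have h0 := pvAUpd_foldl key.toList m 0 c
    simp only [Nat.zero_add] at h0
    rw [h0]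
    rfl

-- values appearing in pvMinIdx are nonnegative
theorem pvMinIdx_nonneg (keymap : List String) (c : Char) :
    ∀ v, pvMinIdx keymap c = some v → 0 ≤ v := by
  unfold pvMinIdx
  suffices h : ∀ (km : List String) (o : Option Int), (∀ v, o = some v → 0 ≤ v) →
      ∀ v, km.foldl (fun o key => pvComb o (pvFirst key c)) o = some v → 0 ≤ v by
    exact h keymap none (by simp)
  intro km
  induction km with
  | nil => intro o ho; exact ho
  | cons key km ih =>
    intro o ho
    refine ih _ ?_
    intro v hv
    replace hv : pvComb o (pvFirst key c) = some v := hv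
    by_cases hm : c ∈ key.toList
    · rw [pvFirst_of_mem hm] at hv
      cases h : o with
      | none => rw [h] at hv; simp at hv; omega
      | some w =>
        rw [h] at hv; simp at hv
        have := ho w h
        omega
    · rw [pvFirst_of_not_mem hm] at hv
      rw [pvComb_none_right] at hv
      exact ho v hv

-- B's keymap scan computes pvMinIdx (with -1 for none)
theorem pvBest_eq (keymap : List String) (c : Char) :
    pvBest keymap c = (pvMinIdx keymap c).getD (-1) := by
  unfold pvBest pvMinIdx
  suffices h : ∀ (km : List String) (o : Option Int), (∀ v, o = some v → 0 ≤ v) →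
      km.foldl (fun best key =>
        if c ∈ key.toList then
          let p : Int := (key.toList.idxOf c : Int)
          if best = -1 ∨ p < best then p else best
        else best) (o.getD (-1))
      = (km.foldl (fun o key => pvComb o (pvFirst key c)) o).getD (-1) by
    exact h keymap none (by simp)
  intro km
  induction km with
  | nil => intro o _; rfl
  | cons key km ih =>
    intro o ho
    simp only [List.foldl_cons]
    by_cases hm : c ∈ key.toList
    · rw [pvFirst_of_mem hm]
      cases h : o with
      | none =>
        simp only [hm, if_true, Option.getD_none, pvComb_none]
        rw [if_pos (Or.inl trivial)]
        rw [show ((key.toList.idxOf c : Nat) : Int) = (some ((key.toList.idxOf c : Nat) : Int) : Option Int).getD (-1) from rfl]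
        exact ih _ (by intro v hv; simp at hv; omega)
      | some w =>
        have hw := ho w h
        have hne : ¬ ((w : Int) = -1) := by omega
        simp only [hm, if_true, Option.getD_some, pvComb_some_some]
        have heq : (if w = -1 ∨ ((key.toList.idxOf c : Nat) : Int) < w
            then ((key.toList.idxOf c : Nat) : Int) else w)
            = min ((key.toList.idxOf c : Nat) : Int) w := by
          split_ifs with hcond
          · rcases hcond with hcond | hcond
            · exact absurd hcond hne
            · omega
          · omega
        rw [heq]
        rw [show min ((key.toList.idxOf c : Nat) : Int) w = (some (min ((key.toList.idxOf c : Nat) : Int) w) : Option Int).getD (-1) from rfl]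
        exact ih _ (by intro v hv; simp at hv; omega)
    · rw [pvFirst_of_not_mem hm, pvComb_none_right]
      simp only [hm, if_false]
      exact ih o ho

-- the per-target loops agree
theorem pvTgt_eq (keymap : List String) (t : List Char) :
    ∀ total : Int,
      pvTgt keymap total t
        = match pvSumT (pvBuild keymap) t with
          | some s => total + s
          | none => -1 := by
  induction t with
  | nil => intro total; simp [pvTgt, pvSumT]
  | cons c cs ih =>
    intro total
    have hbest : pvBest keymap c = ((pvBuild keymap).get? c).getD (-1) := by
      rw [pvBest_eq, pvBuild_get?]
    cases h : (pvBuild keymap).get? c with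
    | none =>
      rw [h, Option.getD_none] at hbest
      simp only [pvTgt, pvSumT, h, hbest]
      rw [if_pos trivial]
    | some v =>
      have hv : 0 ≤ v := pvMinIdx_nonneg keymap c v (by rw [← pvBuild_get?, h])
      rw [h, Option.getD_some] at hbest
      simp only [pvTgt, pvSumT, h, hbest]
      rw [if_neg (show ¬ v = -1 by omega), ih (total + v + 1)]
      cases hrest : pvSumT (pvBuild keymap) cs with
      | none => rfl
      | some s =>
        simp only [Option.map_some]
        show total + v + 1 + s = total + (v + 1 + s)
        omega

-- ===== VERDICT (by name: the statement is the Claim_ definition above) =====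
theorem solution_spec : Claim_equal_solution := by
  intro keymap targets _
  unfold Spec_solution solution solution_alt
  simp only [List.map_inj_left]
  intro target _
  rw [pvTgt_eq keymap target.toList 0]
  cases h : pvSumT (pvBuild keymap) target.toList with
  | none => rfl
  | some s => simp
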